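-- pv_equiv track=rewrite | github.com/suryakumaran2611/auto-arch-diagram | tools/generate_arch_diagram.py | _group_resources_by_env
-- ===== SOURCE A (Python) =====
-- from typing import Any, Iterable, Optional
--
-- def _normalize_env_name(name: str | None) -> str | None:
--     if not name:
--         return None
--     return name.strip().lower()
--
-- def _group_resources_by_env(
--     resources: dict[str, dict[str, Any]]
-- ) -> dict[str, list[str]]:
--     groups: dict[str, list[str]] = {}
--     for res, attrs in resources.items():
--         env = _normalize_env_name(attrs.get("_auto_arch_env")) if attrs else None
--         env_key = env or "shared"
--         groups.setdefault(env_key, []).append(res)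
--     return groups
-- ===== SOURCE B (Python) =====
-- def _normalize_env_name(name):
--     if not name:
--         return None
--     return name.strip().lower()
--
-- def _group_resources_by_env(resources):
--     # Different decomposition: materialize (key, res) pairs, take the keys'
--     # first-occurrence order, then collect each group with one filter pass.
--     pairs = []
--     for res, attrs in resources.items():
--         env = _normalize_env_name(attrs.get("_auto_arch_env")) if attrs else None
--         pairs.append((env or "shared", res))
--     order = list(dict.fromkeys(k for k, _ in pairs))
--     return {k: [r for kk, r in pairs if kk == k] for k in order}
-- ===== Notes on version B (the rewrite author's own statement) =====
-- stated objective: alternative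
-- what changed: Replaces the incremental dict-of-lists accumulation via setdefault/append with a pairs-then-group pass: build (key, res) pairs, dedup the keys in first-occurrence order, and collect each group with a filter comprehension.
import Mathlib
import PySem

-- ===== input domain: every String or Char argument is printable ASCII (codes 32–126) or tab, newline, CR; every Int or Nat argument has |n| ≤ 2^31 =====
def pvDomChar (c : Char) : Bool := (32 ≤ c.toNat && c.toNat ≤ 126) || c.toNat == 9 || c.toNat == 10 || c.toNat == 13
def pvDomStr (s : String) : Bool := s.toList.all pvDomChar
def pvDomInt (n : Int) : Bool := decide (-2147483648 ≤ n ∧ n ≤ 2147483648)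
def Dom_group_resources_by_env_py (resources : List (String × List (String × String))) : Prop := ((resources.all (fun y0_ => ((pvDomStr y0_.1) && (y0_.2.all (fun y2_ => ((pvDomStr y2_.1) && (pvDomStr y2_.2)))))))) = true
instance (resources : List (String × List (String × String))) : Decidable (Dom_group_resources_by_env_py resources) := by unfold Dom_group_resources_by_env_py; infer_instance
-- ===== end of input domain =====

-- B replaces A's incremental setdefault/append dict accumulation with a pairs → dedup-keys → filter-per-key grouping pass (alternative decomposition, same results).


-- shared module helper _normalize_env_name (used by both Pythons)
def normEnv (name : Option String) : Option String :=
  match name with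
  | none => none
  | some s => if s = "" then none else some (PySem.Str.lower (PySem.Str.strip s))

-- ===== PORT A =====
-- 'groups.setdefault(k, []).append(res)' mutates the dict's list in place: exactly Dict.modify k [] (· ++ [res])
def group_resources_by_env_py (resources : List (String × List (String × String))) : List (String × List String) :=
  (resources.foldl (fun (groups : PySem.Dict String (List String)) rp =>
      let env := if rp.2.isEmpty then none else normEnv ((PySem.Dict.mk rp.2).get? "_auto_arch_env")
      let env_key := match env with | none => "shared" | some e => if e = "" then "shared" else e
      groups.modify env_key [] (· ++ [rp.1]))
    PySem.Dict.empty).items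

-- ===== PORT B =====
def keyOfB (rp : String × List (String × String)) : String :=
  let env := if rp.2.isEmpty then none else normEnv ((PySem.Dict.mk rp.2).get? "_auto_arch_env")
  match env with | none => "shared" | some e => if e = "" then "shared" else e

def group_resources_by_env_py_alt (resources : List (String × List (String × String))) : List (String × List String) :=
  let pairs := resources.map (fun rp => (keyOfB rp, rp.1))
  let order := PySem.List.dedup (pairs.map (·.1))
  order.map (fun k => (k, (pairs.filter (fun p => p.1 == k)).map (·.2)))

-- ===== PRECONDITION & SPEC =====
def Spec_group_resources_by_env_py (resources : List (String × List (String × String))) (out : List (String × List String)) : Prop := out = group_resources_by_env_py_alt resources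
instance (resources : List (String × List (String × String))) (out : List (String × List String)) : Decidable (Spec_group_resources_by_env_py resources out) := by unfold Spec_group_resources_by_env_py; infer_instance

-- ===== CLAIM (what is proved, stated in full; the proofs are below) =====
def Claim_equal_group_resources_by_env_py : Prop := ∀ (resources : List (String × List (String × String))), Dom_group_resources_by_env_py resources → Spec_group_resources_by_env_py resources (group_resources_by_env_py resources)

-- ===== LEMMAS AND PROOFS =====

theorem A_eq_fold_keyOf (resources : List (String × List (String × String))) :
    group_resources_by_env_py resources =
      ((resources.map (fun rp => (keyOfB rp, rp.1))).foldl
        (fun (d : PySem.Dict String (List String)) p => d.modify p.1 [] (· ++ [p.2]))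
        PySem.Dict.empty).items := by
  rw [List.foldl_map]
  rfl

-- ===== VERDICT (by name: the statement is the Claim_ definition above) =====
theorem group_resources_by_env_py_spec : Claim_equal_group_resources_by_env_py := by
  intro resources _
  unfold Spec_group_resources_by_env_py group_resources_by_env_py_alt
  rw [A_eq_fold_keyOf]
  set pairs := resources.map (fun rp => (keyOfB rp, rp.1)) with hpairs
  set d := pairs.foldl (fun (d : PySem.Dict String (List String)) p => d.modify p.1 [] (· ++ [p.2])) PySem.Dict.empty with hd
  have hnd : d.keys.Nodup := by
    rw [hd]
    exact PySem.Dict.nodup_keys_foldl_modify_key pairs (·.1) [] (fun d p => (· ++ [p.2])) _ PySem.Dict.nodup_keys_empty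
  have hkeys : d.keys = PySem.List.dedup (pairs.map (·.1)) := by
    rw [hd, PySem.Dict.keys_foldl_modify_key]
    simp [PySem.Set.update, PySem.Set.ofList]
  rw [PySem.Dict.items_eq_map_keys d hnd ([] : List String), hkeys]
  refine List.map_congr_left (fun k _ => ?_)
  have hget : d.getD k [] = (pairs.filter (fun p => p.1 == k)).map (·.2) := by
    rw [hd, PySem.Dict.getD_foldl_modify_append]
    simp
  rw [hget]
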